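-- pv_equiv track=rewrite | github.com/foolishzhao/leetcode | python3/0400/_0401_Binary_Watch/main.py | readBinaryWatch2
-- ===== SOURCE A (Python) =====
-- from typing import List
--
-- def readBinaryWatch2(num: int) -> List[str]:
--     def numOfBitOne(n):
--         res = 0
--         for i in range(10):
--             if n & (1 << i):
--                 res += 1
--         return res
--
--     res = list()
--     for h in range(12):
--         for m in range(60):
--             if numOfBitOne(h) + numOfBitOne(m) == num:
--                 if m < 10:
--                     res.append(str(h) + ":0" + str(m))
--                 else:
--                     res.append(str(h) + ":" + str(m))
--     return res
-- ===== SOURCE B (Python) =====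
-- from typing import List
--
-- def readBinaryWatch2(num: int) -> List[str]:
--     # Enumerate lit-LED patterns (size-num subsets of the 10 LEDs) instead of
--     # scanning all 720 times; positions 0-3 are hour bits, 4-9 minute bits.
--     def combos(ps, k):
--         # all ascending k-element subsets of ps, first those containing ps[0]
--         if k == 0:
--             return [[]]
--         if not ps:
--             return []
--         p, rest = ps[0], ps[1:]
--         return [[p] + c for c in combos(rest, k - 1)] + combos(rest, k)
--
--     if num < 0:
--         return []
--     pairs = []
--     for c in combos(list(range(10)), num):
--         h = sum(1 << p for p in c if p < 4)
--         m = sum(1 << (p - 4) for p in c if p >= 4)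
--         if h < 12 and m < 60:
--             pairs.append((h, m))
--     pairs.sort(key=lambda p: 60 * p[0] + p[1])
--     return ["%d:%02d" % (h, m) for h, m in pairs]
-- ===== Notes on version B (the rewrite author's own statement) =====
-- stated objective: alternative
-- what changed: B enumerates size-num subsets of the watch's LEDs by recursion (four hour bits, six minute bits), keeps the pairs forming a valid time and sorts them, instead of scanning every time of day and popcounting each.
import Mathlib
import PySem

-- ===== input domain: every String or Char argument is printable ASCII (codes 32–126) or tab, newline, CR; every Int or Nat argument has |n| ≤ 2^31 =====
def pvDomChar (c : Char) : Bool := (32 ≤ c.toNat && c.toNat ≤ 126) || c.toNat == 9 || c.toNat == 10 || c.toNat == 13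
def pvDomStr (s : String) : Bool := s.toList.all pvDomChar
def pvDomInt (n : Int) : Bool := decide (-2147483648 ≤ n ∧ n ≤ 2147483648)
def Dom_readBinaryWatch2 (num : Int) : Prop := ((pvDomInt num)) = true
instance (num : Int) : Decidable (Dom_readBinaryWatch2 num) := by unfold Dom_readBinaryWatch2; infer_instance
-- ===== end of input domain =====

-- B enumerates size-num subsets of the watch's LEDs (low positions are hour bits, the rest
-- minute bits) and sorts the valid (hour, minute) pairs, instead of scanning every time of day.


-- ===== PORT A =====
-- helper numOfBitOne: res starts at 0; for i in range(10): if n & (1 << i): res += 1.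
-- i ∈ [0,9] here, so i.toNat is exactly Python's shift count.
def numOfBitOne (n : Int) : Int :=
  (PySem.List.pyRange 0 10 1).foldl
    (fun res i => if PySem.Int.band n ((1 : Int) <<< i.toNat) ≠ 0 then res + 1 else res) 0

def readBinaryWatch2 (num : Int) : List String :=
  (PySem.List.pyRange 0 12 1).foldl (fun res h =>
    (PySem.List.pyRange 0 60 1).foldl (fun res m =>
      if numOfBitOne h + numOfBitOne m = num then
        if m < 10 then res ++ [PySem.Int.toStr h ++ ":0" ++ PySem.Int.toStr m]
        else res ++ [PySem.Int.toStr h ++ ":" ++ PySem.Int.toStr m]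
      else res) res) []

-- ===== PORT B =====
-- combos(ps, k) from Source B: all ascending k-element subsets of ps, first those containing ps[0]
def pvCombos (ps : List Int) (k : Int) : List (List Int) :=
  if k = 0 then [[]]
  else match ps with
    | [] => []
    | p :: rest => (pvCombos rest (k - 1)).map (fun c => p :: c) ++ pvCombos rest k

-- "%d:%02d" % (h, m); exact for 0 ≤ m (m is a sum of powers of two here)
def pvFmt (h m : Int) : String :=
  let ms := PySem.Int.toChars m
  String.ofList (PySem.Int.toChars h ++ [':'] ++ (if ms.length < 2 then '0' :: ms else ms))

def readBinaryWatch2_alt (num : Int) : List String :=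
  if num < 0 then []
  else
    let pairs := (pvCombos (PySem.List.pyRange 0 10 1) num).foldl (fun pairs c =>
      let h : Int := ((c.filter (fun p => p < 4)).map (fun p => (1 : Int) <<< p.toNat)).sum
      let m : Int := ((c.filter (fun p => p ≥ 4)).map (fun p => (1 : Int) <<< (p - 4).toNat)).sum
      if h < 12 ∧ m < 60 then pairs ++ [(h, m)] else pairs) []
    (PySem.List.sorted pairs (fun p => 60 * p.1 + p.2) false).map (fun p => pvFmt p.1 p.2)

-- ===== PRECONDITION & SPEC =====
def Spec_readBinaryWatch2 (num : Int) (out : List String) : Prop := out = readBinaryWatch2_alt num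
instance (num : Int) (out : List String) : Decidable (Spec_readBinaryWatch2 num out) := by unfold Spec_readBinaryWatch2; infer_instance

-- ===== CLAIM (what is proved, stated in full; the proofs are below) =====
def Claim_equal_readBinaryWatch2 : Prop := ∀ (num : Int), Dom_readBinaryWatch2 num → Spec_readBinaryWatch2 num (readBinaryWatch2 num)

-- ===== LEMMAS AND PROOFS =====

theorem pvFoldlFixed {α β : Type} (f : β → α → β) (l : List α) (acc : β)
    (h : ∀ x ∈ l, ∀ b, f b x = b) : l.foldl f acc = acc := by
  induction l generalizing acc with
  | nil => rfl
  | cons a t ih =>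
    simp only [List.foldl_cons, h a (by simp)]
    exact ih acc (fun x hx b => h x (by simp [hx]) b)

theorem pvCombos_nil (ps : List Int) (k : Int) (h : (ps.length : Int) < k) : pvCombos ps k = [] := by
  induction ps generalizing k with
  | nil => rw [pvCombos, if_neg (by simp at h; omega)]
  | cons p rest ih =>
    rw [pvCombos, if_neg (by simp at h; omega)]
    simp only [List.length_cons] at h
    rw [ih (k - 1) (by omega), ih k (by omega)]
    rfl

theorem pvBitsH : ∀ h ∈ PySem.List.pyRange 0 12 1, 0 ≤ numOfBitOne h ∧ numOfBitOne h ≤ 4 := by decide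

theorem pvBitsM : ∀ m ∈ PySem.List.pyRange 0 60 1, 0 ≤ numOfBitOne m ∧ numOfBitOne m ≤ 6 := by decide

theorem pvAEmpty (num : Int) (hn : num < 0 ∨ 10 < num) : readBinaryWatch2 num = [] := by
  unfold readBinaryWatch2
  refine pvFoldlFixed _ _ _ ?_
  intro h hh res
  refine pvFoldlFixed _ _ _ ?_
  intro m hm b
  have h1 := pvBitsH h hh
  have h2 := pvBitsM m hm
  rw [if_neg (by omega)]

theorem pvBEmpty (num : Int) (hn : num < 0 ∨ 10 < num) : readBinaryWatch2_alt num = [] := by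
  unfold readBinaryWatch2_alt
  rcases hn with hn | hn
  · rw [if_pos hn]
  · rw [if_neg (by omega), pvCombos_nil (PySem.List.pyRange 0 10 1) num (by simp [PySem.List.length_pyRange_one]; omega)]
    rfl

-- ===== VERDICT (by name: the statement is the Claim_ definition above) =====
set_option maxRecDepth 10000 in
theorem readBinaryWatch2_spec : Claim_equal_readBinaryWatch2 := by
  unfold Claim_equal_readBinaryWatch2 Spec_readBinaryWatch2
  intro num _
  by_cases h0 : 0 ≤ num ∧ num ≤ 10
  · obtain ⟨h1, h2⟩ := h0
    interval_cases num <;> decide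
  · rw [pvAEmpty num (by omega), pvBEmpty num (by omega)]
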